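-- pv_equiv track=rewrite | github.com/mamadsaeed/Augmentation-COCO.Json | augmentation.py | anot_bbox
-- ===== SOURCE A (Python) =====
-- width = 640
--
-- def seg_rot90(A):
--     output = []
--     for i in range(0, len(A), 2):
--         output.append(A[i + 1])
--         output.append(width - A[i] + 1)
--     return output
--
-- def seg_flip_h(A):
--     output = []
--     for i in range(0, len(A), 2):
--         output.append(A[i])
--         output.append(width - A[i + 1] + 1)
--     return output
--
-- def seg_flip_v(A):
--     output = []
--     for i in range(0, len(A), 2):
--         output.append(width - A[i] + 1)
--         output.append(A[i + 1])
--     return output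
--
-- def convert_bbox2seg(bbox):
--     return [
--         bbox[0],
--         bbox[1],
--         bbox[0],
--         bbox[1] + bbox[2] - 1,
--         bbox[0] + bbox[3] - 1,
--         bbox[1],
--         bbox[0] + bbox[3] - 1,
--         bbox[1] + bbox[2] - 1,
--     ]
--
-- def anot_bbox(bbox, type):
--     A = convert_bbox2seg(bbox)
--     if type == "90":
--         A = seg_rot90(A)
--     elif type == "270":
--         for i in range(3):
--             A = seg_rot90(A)
--     elif type == "v":
--         A = seg_flip_v(A)
--     elif type == "h":
--         A = seg_flip_h(A)
--     elif type == "vh":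
--         A = seg_flip_v(A)
--         A = seg_flip_h(A)
--     elif type == "90h":
--         A = seg_rot90(A)
--         A = seg_flip_h(A)
--     elif type == "90v":
--         A = seg_rot90(A)
--         A = seg_flip_v(A)
--     small_value = A[0] ** 2 + A[1] ** 2
--     small_index = 0
--     big_value = A[0] ** 2 + A[1] ** 2
--     big_index = 0
--     for i in range(1, 4):
--         i_value = A[i * 2] ** 2 + A[i * 2 + 1] ** 2
--         if small_value > i_value:
--             small_value = i_value
--             small_index = i
--         if big_value < i_value:
--             big_value = i_value
--             big_index = i
--     return [
--         A[small_index * 2],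
--         A[small_index * 2 + 1],
--         A[big_index * 2 + 1] - A[small_index * 2 + 1] + 1,
--         A[big_index * 2] - A[small_index * 2] + 1,
--     ]
-- ===== SOURCE B (Python) =====
-- width = 640
--
-- def anot_bbox(bbox, type):
--     x, y, w, h = bbox[0], bbox[1], bbox[2], bbox[3]
--     W = width
--     maps = {
--         "90": lambda p: (p[1], W - p[0] + 1),
--         "270": lambda p: (W - p[1] + 1, p[0]),
--         "v": lambda p: (W - p[0] + 1, p[1]),
--         "h": lambda p: (p[0], W - p[1] + 1),
--         "vh": lambda p: (W - p[0] + 1, W - p[1] + 1),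
--         "90h": lambda p: (p[1], p[0]),
--         "90v": lambda p: (W - p[1] + 1, W - p[0] + 1),
--     }
--     f = maps.get(type, lambda p: p)
--     pts = [f(p) for p in [(x, y), (x, y + w - 1), (x + h - 1, y), (x + h - 1, y + w - 1)]]
--     nx, ny = min(pts, key=lambda p: p[0] * p[0] + p[1] * p[1])
--     fx, fy = max(pts, key=lambda p: p[0] * p[0] + p[1] * p[1])
--     return [nx, ny, fy - ny + 1, fx - nx + 1]
-- ===== Notes on version B (the rewrite author's own statement) =====
-- stated objective: simpler
-- what changed: Represents the bbox as four (x,y) corner points with one closed-form per-point transform per type (270 composed directly instead of three rot90 passes), and picks the nearest/farthest corner with builtin min()/max() keyed on x^2+y^2 instead of the hand-rolled index loop.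
import Mathlib
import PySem

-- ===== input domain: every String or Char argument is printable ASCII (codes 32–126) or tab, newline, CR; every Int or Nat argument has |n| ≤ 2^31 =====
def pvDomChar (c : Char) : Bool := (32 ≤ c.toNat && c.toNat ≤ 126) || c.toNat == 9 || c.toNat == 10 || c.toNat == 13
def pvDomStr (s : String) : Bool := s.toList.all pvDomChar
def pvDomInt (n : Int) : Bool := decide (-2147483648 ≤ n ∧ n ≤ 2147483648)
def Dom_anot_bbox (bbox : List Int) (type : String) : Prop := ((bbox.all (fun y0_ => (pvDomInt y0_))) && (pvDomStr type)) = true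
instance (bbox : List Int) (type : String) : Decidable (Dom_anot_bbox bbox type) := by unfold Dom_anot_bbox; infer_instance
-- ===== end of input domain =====

-- B re-implements A by mapping one closed-form point transform over the four bbox corners
-- and selecting nearest/farthest corner with min?/max? keyed on x*x+y*y (objective: simpler).

-- ===== PORT A =====
def segRot90 : List Int → List Int
  | a :: b :: rest => b :: (640 - a + 1) :: segRot90 rest
  | _ => []

def segFlipH : List Int → List Int
  | a :: b :: rest => a :: (640 - b + 1) :: segFlipH rest
  | _ => []

def segFlipV : List Int → List Int
  | a :: b :: rest => (640 - a + 1) :: b :: segFlipV rest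
  | _ => []

def convertBbox2seg (bbox : List Int) : List Int :=
  let b0 := (PySem.List.pyGet? bbox 0).getD 0
  let b1 := (PySem.List.pyGet? bbox 1).getD 0
  let b2 := (PySem.List.pyGet? bbox 2).getD 0
  let b3 := (PySem.List.pyGet? bbox 3).getD 0
  [b0, b1, b0, b1 + b2 - 1, b0 + b3 - 1, b1, b0 + b3 - 1, b1 + b2 - 1]

-- one step of A's hand-rolled nearest/farthest index loop, state (small_value, small_index, big_value, big_index)
def selStep (g : Int → Int) (s : Int × Int × Int × Int) (i : Int) : Int × Int × Int × Int :=
  let iv := g (i * 2) ^ 2 + g (i * 2 + 1) ^ 2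
  let s1 : Int × Int := if s.1 > iv then (iv, i) else (s.1, s.2.1)
  let s2 : Int × Int := if s.2.2.1 < iv then (iv, i) else (s.2.2.1, s.2.2.2)
  (s1.1, s1.2, s2.1, s2.2)

-- the tail of A (A's selection loop over i in range(1, 4) plus its return list), factored as a helper
def selA (A : List Int) : List Int :=
  let g : Int → Int := fun i => (PySem.List.pyGet? A i).getD 0
  let st := (PySem.List.pyRange 1 4 1).foldl (selStep g)
    (g 0 ^ 2 + g 1 ^ 2, 0, g 0 ^ 2 + g 1 ^ 2, 0)
  [g (st.2.1 * 2), g (st.2.1 * 2 + 1),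
   g (st.2.2.2 * 2 + 1) - g (st.2.1 * 2 + 1) + 1,
   g (st.2.2.2 * 2) - g (st.2.1 * 2) + 1]

def anot_bbox (bbox : List Int) (type : String) : List Int :=
  let A0 := convertBbox2seg bbox
  let A :=
    if type == "90" then segRot90 A0
    else if type == "270" then (List.range 3).foldl (fun a _ => segRot90 a) A0
    else if type == "v" then segFlipV A0
    else if type == "h" then segFlipH A0
    else if type == "vh" then segFlipH (segFlipV A0)
    else if type == "90h" then segFlipH (segRot90 A0)
    else if type == "90v" then segFlipV (segRot90 A0)
    else A0
  selA A

-- ===== PORT B =====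
-- the tail of B (min()/max() keyed on x*x+y*y plus the return list), factored as a helper
def selB (pts : List (Int × Int)) : List Int :=
  let key : Int × Int → Int := fun p => p.1 * p.1 + p.2 * p.2
  match PySem.List.min? pts key, PySem.List.max? pts key with
  | some n, some m => [n.1, n.2, m.2 - n.2 + 1, m.1 - n.1 + 1]
  | _, _ => []

def anot_bbox_alt (bbox : List Int) (type : String) : List Int :=
  let x := (PySem.List.pyGet? bbox 0).getD 0
  let y := (PySem.List.pyGet? bbox 1).getD 0
  let w := (PySem.List.pyGet? bbox 2).getD 0
  let h := (PySem.List.pyGet? bbox 3).getD 0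
  let f : Int × Int → Int × Int :=
    if type == "90" then fun p => (p.2, 640 - p.1 + 1)
    else if type == "270" then fun p => (640 - p.2 + 1, p.1)
    else if type == "v" then fun p => (640 - p.1 + 1, p.2)
    else if type == "h" then fun p => (p.1, 640 - p.2 + 1)
    else if type == "vh" then fun p => (640 - p.1 + 1, 640 - p.2 + 1)
    else if type == "90h" then fun p => (p.2, p.1)
    else if type == "90v" then fun p => (640 - p.2 + 1, 640 - p.1 + 1)
    else fun p => p
  selB ([(x, y), (x, y + w - 1), (x + h - 1, y), (x + h - 1, y + w - 1)].map f)

-- ===== PRECONDITION & SPEC =====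
-- Pre_ excludes bboxes with fewer than 4 entries, on which A raises IndexError.
def Pre_anot_bbox (bbox : List Int) (type : String) : Prop := 4 ≤ bbox.length
instance (bbox : List Int) (type : String) : Decidable (Pre_anot_bbox bbox type) := by unfold Pre_anot_bbox; infer_instance
def pvWitness_anot_bbox : List Int × String := ([1, 2, 3, 4], "90")
def Spec_anot_bbox (bbox : List Int) (type : String) (out : List Int) : Prop := out = anot_bbox_alt bbox type
instance (bbox : List Int) (type : String) (out : List Int) : Decidable (Spec_anot_bbox bbox type out) := by unfold Spec_anot_bbox; infer_instance

-- ===== CLAIM (what is proved, stated in full; the proofs are below) =====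
def Claim_equal_anot_bbox : Prop := ∀ (bbox : List Int) (type : String), Dom_anot_bbox bbox type → Pre_anot_bbox bbox type → Spec_anot_bbox bbox type (anot_bbox bbox type)

-- ===== LEMMAS AND PROOFS =====

def kOf (g : Int → Int) (i : Int) : Int := g (i * 2) ^ 2 + g (i * 2 + 1) ^ 2
def ptOf (g : Int → Int) (i : Int) : Int × Int := (g (i * 2), g (i * 2 + 1))
def minIdx (g : Int → Int) (is : List Int) (a : Int) : Int :=
  is.foldl (fun a i => if kOf g i < kOf g a then i else a) a
def maxIdx (g : Int → Int) (is : List Int) (a : Int) : Int :=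
  is.foldl (fun a i => if kOf g a < kOf g i then i else a) a

theorem minIdx_cons (g : Int → Int) (i : Int) (t : List Int) (a : Int) :
    minIdx g (i :: t) a = minIdx g t (if kOf g i < kOf g a then i else a) := rfl
theorem maxIdx_cons (g : Int → Int) (i : Int) (t : List Int) (a : Int) :
    maxIdx g (i :: t) a = maxIdx g t (if kOf g a < kOf g i then i else a) := rfl

theorem loopA (g : Int → Int) (is : List Int) (sv bv : Int) (si bi : Int)
    (hs : sv = kOf g si) (hb : bv = kOf g bi) :
    List.foldl (selStep g) (sv, si, bv, bi) is
    = (kOf g (minIdx g is si), minIdx g is si, kOf g (maxIdx g is bi), maxIdx g is bi) := by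
  induction is generalizing sv bv si bi with
  | nil => simp [minIdx, maxIdx, hs, hb]
  | cons i t ih =>
    rw [List.foldl_cons, minIdx_cons, maxIdx_cons]
    have hstep : selStep g (sv, si, bv, bi) i
        = (kOf g (if kOf g i < kOf g si then i else si),
           (if kOf g i < kOf g si then i else si),
           kOf g (if kOf g bi < kOf g i then i else bi),
           (if kOf g bi < kOf g i then i else bi)) := by
      simp only [selStep, gt_iff_lt, hs, hb, kOf]
      by_cases h1 : g (i*2) ^ 2 + g (i*2+1) ^ 2 < g (si*2) ^ 2 + g (si*2+1) ^ 2 <;>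
        by_cases h2 : g (bi*2) ^ 2 + g (bi*2+1) ^ 2 < g (i*2) ^ 2 + g (i*2+1) ^ 2 <;>
        simp [h1, h2]
    rw [hstep]
    exact ih _ _ _ _ rfl rfl

theorem min?_cons (key : Int × Int → Int) (p : Int × Int) (l : List (Int × Int)) :
    PySem.List.min? (p :: l) key
    = some (List.foldl (fun m x => if key x < key m then x else m) p l) := by
  induction l generalizing p with
  | nil => rfl
  | cons x t ih =>
    have hstep : PySem.List.min? (p :: x :: t) key
        = PySem.List.min? ((if key x < key p then x else p) :: t) key := by
      by_cases h : key x < key p <;> simp [PySem.List.min?, h]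
    rw [hstep, ih, List.foldl_cons]

theorem max?_cons (key : Int × Int → Int) (p : Int × Int) (l : List (Int × Int)) :
    PySem.List.max? (p :: l) key
    = some (List.foldl (fun m x => if key m < key x then x else m) p l) := by
  induction l generalizing p with
  | nil => rfl
  | cons x t ih =>
    have hstep : PySem.List.max? (p :: x :: t) key
        = PySem.List.max? ((if key p < key x then x else p) :: t) key := by
      by_cases h : key p < key x <;> simp [PySem.List.max?, h]
    rw [hstep, ih, List.foldl_cons]

theorem foldl_min_map (pt : Int → Int × Int) (key : Int × Int → Int) (is : List Int) (a : Int) :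
    List.foldl (fun m x => if key x < key m then x else m) (pt a) (is.map pt)
    = pt (is.foldl (fun a i => if key (pt i) < key (pt a) then i else a) a) := by
  induction is generalizing a with
  | nil => rfl
  | cons i t ih =>
    simp only [List.map_cons, List.foldl_cons]
    by_cases h : key (pt i) < key (pt a) <;> simp only [h, ite_true, ite_false] <;> exact ih _

theorem foldl_max_map (pt : Int → Int × Int) (key : Int × Int → Int) (is : List Int) (a : Int) :
    List.foldl (fun m x => if key m < key x then x else m) (pt a) (is.map pt)
    = pt (is.foldl (fun a i => if key (pt a) < key (pt i) then i else a) a) := by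
  induction is generalizing a with
  | nil => rfl
  | cons i t ih =>
    simp only [List.map_cons, List.foldl_cons]
    by_cases h : key (pt a) < key (pt i) <;> simp only [h, ite_true, ite_false] <;> exact ih _

theorem select_eq (x0 y0 x1 y1 x2 y2 x3 y3 : Int) :
    selA [x0, y0, x1, y1, x2, y2, x3, y3] = selB [(x0, y0), (x1, y1), (x2, y2), (x3, y3)] := by
  have hr : PySem.List.pyRange 1 4 1 = [1, 2, 3] := by decide
  set L := [x0, y0, x1, y1, x2, y2, x3, y3] with hL
  set g : Int → Int := fun i => (PySem.List.pyGet? L i).getD 0 with hg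
  set key : Int × Int → Int := fun p => p.1 * p.1 + p.2 * p.2 with hkey
  have h0 : ptOf g 0 = (x0, y0) := by simp [ptOf, hg, hL, PySem.List.pyGet?, PySem.List.pyIdx?]
  have h1 : ptOf g 1 = (x1, y1) := by simp [ptOf, hg, hL, PySem.List.pyGet?, PySem.List.pyIdx?]
  have h2 : ptOf g 2 = (x2, y2) := by simp [ptOf, hg, hL, PySem.List.pyGet?, PySem.List.pyIdx?]
  have h3 : ptOf g 3 = (x3, y3) := by simp [ptOf, hg, hL, PySem.List.pyGet?, PySem.List.pyIdx?]
  have hinit : g 0 ^ 2 + g 1 ^ 2 = kOf g 0 := by norm_num [kOf]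
  have hfun : (fun (a i : Int) => if key (ptOf g i) < key (ptOf g a) then i else a)
      = fun a i => if kOf g i < kOf g a then i else a := by
    funext a i; simp [kOf, ptOf, hkey, pow_two]
  have hfun2 : (fun (a i : Int) => if key (ptOf g a) < key (ptOf g i) then i else a)
      = fun a i => if kOf g a < kOf g i then i else a := by
    funext a i; simp [kOf, ptOf, hkey, pow_two]
  have hmin : PySem.List.min? [(x0, y0), (x1, y1), (x2, y2), (x3, y3)] key
      = some (ptOf g (minIdx g [1, 2, 3] 0)) := by
    rw [show ([(x0, y0), (x1, y1), (x2, y2), (x3, y3)] : List (Int × Int))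
        = (x0, y0) :: List.map (ptOf g) [1, 2, 3] from by simp [h1, h2, h3]]
    rw [min?_cons, ← h0, foldl_min_map, hfun]
    rfl
  have hmax : PySem.List.max? [(x0, y0), (x1, y1), (x2, y2), (x3, y3)] key
      = some (ptOf g (maxIdx g [1, 2, 3] 0)) := by
    rw [show ([(x0, y0), (x1, y1), (x2, y2), (x3, y3)] : List (Int × Int))
        = (x0, y0) :: List.map (ptOf g) [1, 2, 3] from by simp [h1, h2, h3]]
    rw [max?_cons, ← h0, foldl_max_map, hfun2]
    rfl
  have hA : selA L = [g (minIdx g [1,2,3] 0 * 2), g (minIdx g [1,2,3] 0 * 2 + 1),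
      g (maxIdx g [1,2,3] 0 * 2 + 1) - g (minIdx g [1,2,3] 0 * 2 + 1) + 1,
      g (maxIdx g [1,2,3] 0 * 2) - g (minIdx g [1,2,3] 0 * 2) + 1] := by
    rw [selA.eq_def]
    simp only [← hg, hr]
    rw [loopA g [1,2,3] _ _ 0 0 hinit hinit]
  rw [hA, selB.eq_def]
  simp only [← hkey, hmin, hmax]
  simp [ptOf]

-- ===== VERDICT (by name: the statement is the Claim_ definition above) =====
theorem anot_bbox_spec : Claim_equal_anot_bbox := by
  intro bbox type _ hpre
  unfold Spec_anot_bbox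
  match bbox, hpre with
  | b0 :: b1 :: b2 :: b3 :: rest, _ =>
    have hc : convertBbox2seg (b0 :: b1 :: b2 :: b3 :: rest)
        = [b0, b1, b0, b1 + b2 - 1, b0 + b3 - 1, b1, b0 + b3 - 1, b1 + b2 - 1] := by
      simp [convertBbox2seg, PySem.List.pyGet?, PySem.List.pyIdx?]
      split_ifs <;> first | (exfalso; omega) | simp_all
    have hrange : List.range 3 = [0, 1, 2] := rfl
    unfold anot_bbox anot_bbox_alt
    have g0 : (PySem.List.pyGet? (b0 :: b1 :: b2 :: b3 :: rest) 0).getD 0 = b0 := by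
      simp [PySem.List.pyGet?, PySem.List.pyIdx?]
      split_ifs <;> first | (exfalso; omega) | simp_all
    have g1 : (PySem.List.pyGet? (b0 :: b1 :: b2 :: b3 :: rest) 1).getD 0 = b1 := by
      simp [PySem.List.pyGet?, PySem.List.pyIdx?]
      split_ifs <;> first | (exfalso; omega) | simp_all
    have g2 : (PySem.List.pyGet? (b0 :: b1 :: b2 :: b3 :: rest) 2).getD 0 = b2 := by
      simp [PySem.List.pyGet?, PySem.List.pyIdx?]
      split_ifs <;> first | (exfalso; omega) | simp_all
    have g3 : (PySem.List.pyGet? (b0 :: b1 :: b2 :: b3 :: rest) 3).getD 0 = b3 := by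
      simp [PySem.List.pyGet?, PySem.List.pyIdx?]
      split_ifs <;> first | (exfalso; omega) | simp_all
    by_cases e1 : type = "90"
    · simp only [e1, hc, beq_iff_eq, String.reduceEq, if_true, if_false, ite_true, ite_false, g0, g1, g2, g3, segRot90, List.map]
      refine Eq.trans (congrArg selA ?_) (select_eq _ _ _ _ _ _ _ _)
      norm_num <;> omega
    by_cases e2 : type = "270"
    · simp only [e1, e2, beq_iff_eq, String.reduceEq, if_false, if_true, ite_true, ite_false, g0, g1, g2, g3, hc, hrange, List.foldl, segRot90, List.map]
      refine Eq.trans (congrArg selA ?_) (select_eq _ _ _ _ _ _ _ _)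
      norm_num <;> omega
    by_cases e3 : type = "v"
    · simp only [e1, e2, e3, beq_iff_eq, String.reduceEq, if_false, if_true, ite_true, ite_false, g0, g1, g2, g3, hc, segFlipV, List.map]
      refine Eq.trans (congrArg selA ?_) (select_eq _ _ _ _ _ _ _ _)
      norm_num <;> omega
    by_cases e4 : type = "h"
    · simp only [e1, e2, e3, e4, beq_iff_eq, String.reduceEq, if_false, if_true, ite_true, ite_false, g0, g1, g2, g3, hc, segFlipH, List.map]
      refine Eq.trans (congrArg selA ?_) (select_eq _ _ _ _ _ _ _ _)
      norm_num <;> omega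
    by_cases e5 : type = "vh"
    · simp only [e1, e2, e3, e4, e5, beq_iff_eq, String.reduceEq, if_false, if_true, ite_true, ite_false, g0, g1, g2, g3, hc, segFlipV, segFlipH, List.map]
      refine Eq.trans (congrArg selA ?_) (select_eq _ _ _ _ _ _ _ _)
      norm_num <;> omega
    by_cases e6 : type = "90h"
    · simp only [e1, e2, e3, e4, e5, e6, beq_iff_eq, String.reduceEq, if_false, if_true, ite_true, ite_false, g0, g1, g2, g3, hc, segRot90, segFlipH, List.map]
      refine Eq.trans (congrArg selA ?_) (select_eq _ _ _ _ _ _ _ _)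
      norm_num <;> omega
    by_cases e7 : type = "90v"
    · simp only [e1, e2, e3, e4, e5, e6, e7, beq_iff_eq, String.reduceEq, if_false, if_true, ite_true, ite_false, g0, g1, g2, g3, hc, segRot90, segFlipV, List.map]
      refine Eq.trans (congrArg selA ?_) (select_eq _ _ _ _ _ _ _ _)
      norm_num <;> omega
    · simp only [e1, e2, e3, e4, e5, e6, e7, beq_iff_eq, String.reduceEq, if_false, ite_true, ite_false, g0, g1, g2, g3, hc, List.map]
      refine Eq.trans (congrArg selA ?_) (select_eq _ _ _ _ _ _ _ _)
      norm_num <;> omega
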